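-- pv_equiv track=rewrite | github.com/miliar/Code_Jam_Webscraper | solutions_python/solutions_year11_round2_nr1/331.py | wp
-- ===== SOURCE A (Python) =====
-- def gcd(a,b):
--     while b > 0:
--         a,b = b, a%b
--     return a
--
-- def f_simple(p):
--     if p[0] == 0:
--         return [0,1]
--     g = gcd(p[0], p[1])
--     return [p[0]//g,p[1]//g]
--
-- def wp(p, idd, rm):
--     total = 0
--     nb = 0
--     for team in range(len(p[idd])):
--         if p[idd][team] == '1' and team != rm:
--             total += 1
--         if p[idd][team] != '.' and team != rm:
--             nb += 1
--     return f_simple([total, nb])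
-- ===== SOURCE B (Python) =====
-- def _gcd(a, b):
--     return a if b == 0 else _gcd(b, a % b)
--
-- def wp(p, idd, rm):
--     s = p[idd]
--     total = s.count('1')
--     nb = len(s) - s.count('.')
--     if 0 <= rm < len(s):
--         if s[rm] == '1':
--             total -= 1
--         if s[rm] != '.':
--             nb -= 1
--     if total == 0:
--         return [0, 1]
--     g = _gcd(total, nb)
--     return [total // g, nb // g]
-- ===== Notes on version B (the rewrite author's own statement) =====
-- stated objective: simpler
-- what changed: B replaces A's per-index loop (which tests every position against rm) by two aggregate list counts (count('1') and count('.')) plus an O(1) correction at index rm, and replaces A's iterative while-loop gcd by a recursive Euclid.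
import Mathlib
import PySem

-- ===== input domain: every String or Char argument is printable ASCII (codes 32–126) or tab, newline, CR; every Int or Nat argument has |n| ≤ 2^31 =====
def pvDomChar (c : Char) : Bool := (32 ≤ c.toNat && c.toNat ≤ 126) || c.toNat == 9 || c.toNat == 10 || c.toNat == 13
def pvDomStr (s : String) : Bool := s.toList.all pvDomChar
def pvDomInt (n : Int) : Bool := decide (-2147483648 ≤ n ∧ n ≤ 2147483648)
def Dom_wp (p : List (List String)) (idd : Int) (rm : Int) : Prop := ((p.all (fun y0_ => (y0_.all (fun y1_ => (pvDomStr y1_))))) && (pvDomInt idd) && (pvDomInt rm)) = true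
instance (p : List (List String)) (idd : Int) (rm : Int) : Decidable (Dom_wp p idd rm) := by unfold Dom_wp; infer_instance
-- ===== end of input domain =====

-- B replaces A's per-index loop by two aggregate list counts with an O(1) correction at
-- the excluded index rm, and A's iterative while-loop gcd by a recursive Euclid (objective: simpler).

-- ===== PORT A =====
-- while b > 0: a, b = b, a % b
def gcdA (a b : Int) : Int :=
  if h : b > 0 then gcdA b (PySem.Int.mod a b) else a
termination_by b.toNat
decreasing_by
  have h1 := PySem.Int.mod_nonneg a h
  have h2 := PySem.Int.mod_lt a h
  omega

def f_simpleA (q : List Int) : List Int :=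
  let p0 := PySem.List.pyGetD q 0 0
  let p1 := PySem.List.pyGetD q 1 0
  if p0 = 0 then [0, 1]
  else
    let g := gcdA p0 p1
    [PySem.Int.floordiv p0 g, PySem.Int.floordiv p1 g]

def wp (p : List (List String)) (idd : Int) (rm : Int) : List Int :=
  match PySem.List.pyGet? p idd with
  | none => []  -- IndexError in Python; excluded by Pre_wp
  | some row =>
    let res := (PySem.List.pyRange 0 (row.length : Int) 1).foldl
      (fun (st : Int × Int) team =>
        let st := if PySem.List.pyGetD row team "" = "1" ∧ team ≠ rm then (st.1 + 1, st.2) else st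
        if PySem.List.pyGetD row team "" ≠ "." ∧ team ≠ rm then (st.1, st.2 + 1) else st)
      (0, 0)
    f_simpleA [res.1, res.2]

-- ===== PORT B =====
-- return a if b == 0 else _gcd(b, a % b)
def gcdB (a b : Int) : Int :=
  if h : b = 0 then a else gcdB b (PySem.Int.mod a b)
termination_by b.natAbs
decreasing_by
  rcases lt_or_gt_of_ne h with hneg | hpos
  · have h1 := PySem.Int.mod_neg_bounds a hneg
    omega
  · have h1 := PySem.Int.mod_nonneg a hpos
    have h2 := PySem.Int.mod_lt a hpos
    omega

def wp_alt (p : List (List String)) (idd : Int) (rm : Int) : List Int :=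
  match PySem.List.pyGet? p idd with
  | none => []  -- IndexError in Python; excluded by Pre_wp
  | some s =>
    let total0 : Int := (PySem.List.count s "1" : Int)
    let nb0 : Int := (s.length : Int) - (PySem.List.count s "." : Int)
    let tn : Int × Int :=
      if 0 ≤ rm ∧ rm < (s.length : Int) then
        let c := PySem.List.pyGetD s rm ""
        ((if c = "1" then total0 - 1 else total0), (if c ≠ "." then nb0 - 1 else nb0))
      else (total0, nb0)
    if tn.1 = 0 then [0, 1]
    else
      let g := gcdB tn.1 tn.2
      [PySem.Int.floordiv tn.1 g, PySem.Int.floordiv tn.2 g]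

-- ===== PRECONDITION & SPEC =====
-- A raises IndexError when idd is out of range for p; exactly those inputs are excluded.
def Pre_wp (p : List (List String)) (idd : Int) (rm : Int) : Prop :=
  PySem.Raise.InRange p.length idd
instance (p : List (List String)) (idd : Int) (rm : Int) : Decidable (Pre_wp p idd rm) := by unfold Pre_wp; infer_instance

def pvWitness_wp : List (List String) × Int × Int := ([["1", ".", "0"]], 0, 1)

def Spec_wp (p : List (List String)) (idd : Int) (rm : Int) (out : List Int) : Prop := out = wp_alt p idd rm
instance (p : List (List String)) (idd : Int) (rm : Int) (out : List Int) : Decidable (Spec_wp p idd rm out) := by unfold Spec_wp; infer_instance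

-- ===== CLAIM (what is proved, stated in full; the proofs are below) =====
def Claim_equal_wp : Prop := ∀ (p : List (List String)) (idd : Int) (rm : Int), Dom_wp p idd rm → Pre_wp p idd rm → Spec_wp p idd rm (wp p idd rm)

-- ===== LEMMAS AND PROOFS =====

-- the two gcds agree on nonnegative second argument
theorem gcdA_eq_gcdB (a b : Int) (hb : 0 ≤ b) : gcdA a b = gcdB a b := by
  by_cases h : b = 0
  · subst h; rw [gcdA, gcdB]; simp
  · have hpos : b > 0 := lt_of_le_of_ne hb (Ne.symm h)
    rw [gcdA, gcdB]
    simp only [hpos, h, dite_true, dite_false, if_pos, if_neg]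
    exact gcdA_eq_gcdB b (PySem.Int.mod a b) (PySem.Int.mod_nonneg a hpos)
termination_by b.toNat
decreasing_by
  have h1 := PySem.Int.mod_nonneg a hpos
  have h2 := PySem.Int.mod_lt a hpos
  omega

-- A's loop step
def stepA (row : List String) (rm : Int) (st : Int × Int) (team : Int) : Int × Int :=
  let st := if PySem.List.pyGetD row team "" = "1" ∧ team ≠ rm then (st.1 + 1, st.2) else st
  if PySem.List.pyGetD row team "" ≠ "." ∧ team ≠ rm then (st.1, st.2 + 1) else st

-- B's adjusted counts
def tB (row : List String) (rm : Int) : Int :=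
  (PySem.List.count row "1" : Int) -
    (if 0 ≤ rm ∧ rm < (row.length : Int) ∧ PySem.List.pyGetD row rm "" = "1" then 1 else 0)
def nB (row : List String) (rm : Int) : Int :=
  ((row.length : Int) - (PySem.List.count row "." : Int)) -
    (if 0 ≤ rm ∧ rm < (row.length : Int) ∧ PySem.List.pyGetD row rm "" ≠ "." then 1 else 0)

theorem loop_char (row : List String) (rm : Int) (t n : Int) :
    (PySem.List.pyRange 0 (row.length : Int) 1).foldl (stepA row rm) (t, n)
      = (t + tB row rm, n + nB row rm) := by
  induction row using List.reverseRecOn generalizing t n with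
  | nil =>
    simp only [List.length_nil, Nat.cast_zero, PySem.List.pyRange_one_eq_nil le_rfl,
      List.foldl_nil, tB, nB]
    have h1 : ¬ (0 ≤ rm ∧ rm < (0:Int) ∧ PySem.List.pyGetD ([] : List String) rm "" = "1") := by omega
    have h2 : ¬ (0 ≤ rm ∧ rm < (0:Int) ∧ PySem.List.pyGetD ([] : List String) rm "" ≠ ".") := by omega
    simp [PySem.List.count, h1, h2]
  | append_singleton xs x ih =>
    have hlen : ((xs ++ [x]).length : Int) = (xs.length : Int) + 1 := by
      simp
    rw [hlen, PySem.List.pyRange_one_succ_right (by positivity), List.foldl_append]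
    have hcongr : (PySem.List.pyRange 0 (xs.length : Int) 1).foldl (stepA (xs ++ [x]) rm) (t, n)
        = (PySem.List.pyRange 0 (xs.length : Int) 1).foldl (stepA xs rm) (t, n) := by
      apply PySem.List.foldl_congr_mem
      intro acc team hmem
      have hb := (PySem.List.mem_pyRange_one).1 hmem
      have hget : PySem.List.pyGetD (xs ++ [x]) team "" = PySem.List.pyGetD xs team "" := by
        rw [PySem.List.pyGetD_eq_getElem _ _ hb.1 (by simp; omega),
            PySem.List.pyGetD_eq_getElem _ _ hb.1 (by exact_mod_cast hb.2)]
        rw [List.getElem_append_left (by omega)]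
      simp only [stepA, hget]
    rw [hcongr, ih]
    -- the last step, team = xs.length
    have hgetL : PySem.List.pyGetD (xs ++ [x]) (xs.length : Int) "" = x := by
      rw [PySem.List.pyGetD_eq_getElem _ _ (by positivity) (by simp)]
      simp
    have hc1 : (PySem.List.count (xs ++ [x]) "1" : Int)
        = (PySem.List.count xs "1" : Int) + (if x = "1" then 1 else 0) := by
      simp [PySem.List.count, List.count_append]
      split_ifs with hx <;> simp [hx] <;> omega
    have hcd : (PySem.List.count (xs ++ [x]) "." : Int)
        = (PySem.List.count xs "." : Int) + (if x = "." then 1 else 0) := by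
      simp [PySem.List.count, List.count_append]
      split_ifs with hx <;> simp [hx] <;> omega
    have hgetPre : ∀ (hb : 0 ≤ rm) (hlt : rm < (xs.length : Int)),
        PySem.List.pyGetD (xs ++ [x]) rm "" = PySem.List.pyGetD xs rm "" := by
      intro hb hlt
      rw [PySem.List.pyGetD_eq_getElem _ _ hb (by simp; omega),
          PySem.List.pyGetD_eq_getElem _ _ hb hlt]
      rw [List.getElem_append_left (by omega)]
    simp only [tB, nB, hc1, hcd, hlen]
    by_cases hrm : rm = (xs.length : Int)
    · subst hrm
      simp only [hgetL]
      have h1 : (0 ≤ (xs.length:Int) ∧ (xs.length:Int) < (xs.length:Int) ∧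
          PySem.List.pyGetD xs (xs.length:Int) "" = "1") = False := by
        simp only [eq_iff_iff, iff_false]; omega
      have h2 : (0 ≤ (xs.length:Int) ∧ (xs.length:Int) < (xs.length:Int) ∧
          PySem.List.pyGetD xs (xs.length:Int) "" ≠ ".") = False := by
        simp only [eq_iff_iff, iff_false]; omega
      have hne : (¬ ((xs.length:Int) = (xs.length:Int))) = False := by simp
      have e1 : (0 ≤ ((xs.length:Int)) ∧ ((xs.length:Int)) < ((xs.length:Int)) + 1 ∧ x = "1")
          ↔ x = "1" := by
        constructor
        · rintro ⟨_, _, hc⟩; exact hc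
        · intro hc; exact ⟨by positivity, by omega, hc⟩
      have e2 : (0 ≤ ((xs.length:Int)) ∧ ((xs.length:Int)) < ((xs.length:Int)) + 1 ∧ ¬ x = ".")
          ↔ ¬ x = "." := by
        constructor
        · rintro ⟨_, _, hc⟩; exact hc
        · intro hc; exact ⟨by positivity, by omega, hc⟩
      simp only [h1, h2, ne_eq, e1, e2, if_false, List.foldl_cons, List.foldl_nil, stepA,
        hgetL, hne, and_false]
      split_ifs <;> simp only [Prod.mk.injEq] <;> constructor <;> omega
    · have hne : ((xs.length:Int) = rm) = False := by
        simp only [eq_iff_iff, iff_false]; omega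
      by_cases hin : 0 ≤ rm ∧ rm < (xs.length : Int)
      · have hg := hgetPre hin.1 hin.2
        have e1 : (0 ≤ rm ∧ rm < (xs.length:Int) + 1 ∧ PySem.List.pyGetD (xs ++ [x]) rm "" = "1")
            ↔ (0 ≤ rm ∧ rm < (xs.length:Int) ∧ PySem.List.pyGetD xs rm "" = "1") := by
          rw [hg]
          constructor
          · rintro ⟨ha, hb, hc⟩; exact ⟨ha, by omega, hc⟩
          · rintro ⟨ha, hb, hc⟩; exact ⟨ha, by omega, hc⟩
        have e2 : (0 ≤ rm ∧ rm < (xs.length:Int) + 1 ∧ ¬ PySem.List.pyGetD (xs ++ [x]) rm "" = ".")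
            ↔ (0 ≤ rm ∧ rm < (xs.length:Int) ∧ ¬ PySem.List.pyGetD xs rm "" = ".") := by
          rw [hg]
          constructor
          · rintro ⟨ha, hb, hc⟩; exact ⟨ha, by omega, hc⟩
          · rintro ⟨ha, hb, hc⟩; exact ⟨ha, by omega, hc⟩
        simp only [ne_eq, e1, e2, List.foldl_cons, List.foldl_nil, stepA, hgetL, hne,
          not_false_eq_true, and_true]
        split_ifs <;> simp only [Prod.mk.injEq] <;> constructor <;> omega
      · have h1 : (0 ≤ rm ∧ rm < (xs.length:Int) + 1 ∧
            PySem.List.pyGetD (xs ++ [x]) rm "" = "1") = False := by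
          simp only [eq_iff_iff, iff_false]
          intro h; exact hin ⟨h.1, by omega⟩
        have h1' : (0 ≤ rm ∧ rm < (xs.length:Int) ∧ PySem.List.pyGetD xs rm "" = "1") = False := by
          simp only [eq_iff_iff, iff_false]
          intro h; exact hin ⟨h.1, h.2.1⟩
        have h2 : (0 ≤ rm ∧ rm < (xs.length:Int) + 1 ∧
            ¬ PySem.List.pyGetD (xs ++ [x]) rm "" = ".") = False := by
          simp only [eq_iff_iff, iff_false]
          intro h; exact hin ⟨h.1, by omega⟩
        have h2' : (0 ≤ rm ∧ rm < (xs.length:Int) ∧ ¬ PySem.List.pyGetD xs rm "" = ".") = False := by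
          simp only [eq_iff_iff, iff_false]
          intro h; exact hin ⟨h.1, h.2.1⟩
        simp only [ne_eq, h1, h1', h2, h2', if_false, List.foldl_cons, List.foldl_nil, stepA,
          hgetL, hne, not_false_eq_true, and_true]
        split_ifs <;> simp only [Prod.mk.injEq] <;> constructor <;> omega

-- nB is nonnegative (the "games played" count can not go below zero)
theorem nB_nonneg (row : List String) (rm : Int) : 0 ≤ nB row rm := by
  unfold nB
  have hle : PySem.List.count row "." ≤ row.length := by
    simp [PySem.List.count]; exact List.count_le_length
  split_ifs with h
  · rcases h with ⟨h0, hlt, hne⟩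
    have hmem : PySem.List.pyGetD row rm "" ∈ row :=
      PySem.List.pyGetD_mem row "" (by unfold PySem.Raise.InRange; omega)
    have hpos : 0 < List.countP (fun c => decide ¬ (c = ".")) row := by
      rw [List.countP_pos_iff]
      exact ⟨_, hmem, by simpa using hne⟩
    have hsplit : List.countP (fun c => decide (c = ".")) row
        + List.countP (fun c => decide ¬ (c = ".")) row = row.length := by
      rw [List.length_eq_countP_add_countP (p := fun c => decide (c = ".")) (l := row)]
      congr 1
      apply List.countP_congr; intro a _; simp
    have hcnt : PySem.List.count row "." = List.countP (fun c => decide (c = ".")) row := by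
      rw [PySem.List.count_eq, List.count_eq_countP]
      apply List.countP_congr; intro a _
      simp [beq_iff_eq]
    omega
  · omega

theorem wp_eq (p : List (List String)) (idd rm : Int) (hp : Pre_wp p idd rm) :
    wp p idd rm = wp_alt p idd rm := by
  unfold Pre_wp at hp
  obtain ⟨row, hrow⟩ : ∃ row, PySem.List.pyGet? p idd = some row := by
    cases hg : PySem.List.pyGet? p idd with
    | none => exact absurd hp ((PySem.List.pyGet?_eq_none_iff p idd).1 hg)
    | some r => exact ⟨r, rfl⟩
  unfold wp wp_alt
  rw [hrow]
  simp only
  have hl := loop_char row rm 0 0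
  have hstep : (PySem.List.pyRange 0 (row.length : Int) 1).foldl
      (fun (st : Int × Int) team =>
        let st := if PySem.List.pyGetD row team "" = "1" ∧ team ≠ rm then (st.1 + 1, st.2) else st
        if PySem.List.pyGetD row team "" ≠ "." ∧ team ≠ rm then (st.1, st.2 + 1) else st)
      ((0 : Int), (0 : Int)) = (tB row rm, nB row rm) := by
    have := loop_char row rm 0 0
    simpa [stepA] using this
  rw [hstep]
  -- identify B's pair with (tB, nB)
  have htn : (if 0 ≤ rm ∧ rm < (row.length : Int) then
        ((if PySem.List.pyGetD row rm "" = "1" then (PySem.List.count row "1" : Int) - 1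
          else (PySem.List.count row "1" : Int)),
         (if PySem.List.pyGetD row rm "" ≠ "." then
            ((row.length : Int) - (PySem.List.count row "." : Int)) - 1
          else ((row.length : Int) - (PySem.List.count row "." : Int))))
      else ((PySem.List.count row "1" : Int),
            ((row.length : Int) - (PySem.List.count row "." : Int))))
      = (tB row rm, nB row rm) := by
    unfold tB nB
    split_ifs <;> simp_all <;> omega
  rw [htn]
  simp only [f_simpleA]
  have h0 : PySem.List.pyGetD [tB row rm, nB row rm] 0 0 = tB row rm := by
    simp [PySem.List.pyGetD_zero]
  have h1 : PySem.List.pyGetD [tB row rm, nB row rm] 1 0 = nB row rm := by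
    rw [PySem.List.pyGetD_eq_getElem _ _ (by omega) (by simp)]
    simp
  rw [h0, h1]
  split_ifs with hz
  · rfl
  · rw [gcdA_eq_gcdB _ _ (nB_nonneg row rm)]

-- ===== VERDICT (by name: the statement is the Claim_ definition above) =====
theorem wp_spec : Claim_equal_wp := by
  intro p idd rm _ hpre
  unfold Spec_wp
  exact wp_eq p idd rm hpre
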